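-- pv_equiv track=rewrite | github.com/corne12345/Lekker-oke- | score_functions/calc_money.py | calc_validity
-- ===== SOURCE A (Python) =====
-- def calc_validity(distances):
--     """
--     This function checks if the distances provided as a list as argument fulfill
--     the constraints in terms of free space. It returns a boolean.
--     """
--
--     if (len(distances) != 20):
--         return False
--     else:
--         for i in range(len(distances)):
--             if i < 3:
--                 if distances[i] < 6:
--                     return False
--             elif i < 8:
--                 if distances[i] < 3:
--                     return False
--             else:
--                 if distances[i] < 2:
--                     return False
--     return True
-- ===== SOURCE B (Python) =====
-- def calc_validity(distances):
--     """Zone-based check: slice the list into the three spacing zones and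
--     compare each zone's minimum against its threshold."""
--     if len(distances) != 20:
--         return False
--     return min(distances[:3]) >= 6 and min(distances[3:8]) >= 3 and min(distances[8:]) >= 2
-- ===== Notes on version B (the rewrite author's own statement) =====
-- stated objective: simpler
-- what changed: Replaced A's per-index loop with if/elif threshold branching by slicing the list into its three spacing zones and comparing each zone's minimum (min(slice) >= threshold), so there is no element-wise comparison loop at all.
import Mathlib
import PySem

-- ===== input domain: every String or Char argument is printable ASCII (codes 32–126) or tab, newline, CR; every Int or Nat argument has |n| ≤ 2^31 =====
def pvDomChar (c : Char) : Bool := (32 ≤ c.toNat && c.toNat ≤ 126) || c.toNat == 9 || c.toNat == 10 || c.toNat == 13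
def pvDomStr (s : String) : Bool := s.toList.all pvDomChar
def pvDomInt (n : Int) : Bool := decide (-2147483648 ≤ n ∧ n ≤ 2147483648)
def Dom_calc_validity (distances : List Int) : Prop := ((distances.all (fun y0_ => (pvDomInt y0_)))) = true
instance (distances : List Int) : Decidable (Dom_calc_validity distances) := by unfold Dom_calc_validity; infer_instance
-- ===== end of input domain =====

-- B slices the list into its three spacing zones and compares each zone's minimum to its threshold (simpler: no per-index loop/branching).


-- ===== PORT A =====
-- the 'for i in range(len(distances))' loop with early 'return False', over the range list
def calcValidityLoopA (distances : List Int) : List Int → Bool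
  | [] => true
  | i :: rest =>
    if i < 3 then
      if PySem.List.pyGetD distances i 0 < 6 then false else calcValidityLoopA distances rest
    else if i < 8 then
      if PySem.List.pyGetD distances i 0 < 3 then false else calcValidityLoopA distances rest
    else
      if PySem.List.pyGetD distances i 0 < 2 then false else calcValidityLoopA distances rest

def calc_validity (distances : List Int) : Bool :=
  if distances.length ≠ 20 then false
  else calcValidityLoopA distances (PySem.List.pyRange 0 distances.length 1)

-- ===== PORT B =====
-- min(xs) >= t; the none branch (Python: min([]) raises) is unreachable under B's length guard
def calcValidityMinGe (xs : List Int) (t : Int) : Bool :=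
  match PySem.List.min? xs (fun x => x) with
  | some m => t ≤ m
  | none => false

def calc_validity_alt (distances : List Int) : Bool :=
  if distances.length ≠ 20 then false
  else
    calcValidityMinGe (PySem.List.slice distances none (some 3)) 6 &&
    calcValidityMinGe (PySem.List.slice distances (some 3) (some 8)) 3 &&
    calcValidityMinGe (PySem.List.slice distances (some 8) none) 2

-- ===== PRECONDITION & SPEC =====
def Spec_calc_validity (distances : List Int) (out : Bool) : Prop := out = calc_validity_alt distances
instance (distances : List Int) (out : Bool) : Decidable (Spec_calc_validity distances out) := by unfold Spec_calc_validity; infer_instance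

-- ===== CLAIM (what is proved, stated in full; the proofs are below) =====
def Claim_equal_calc_validity : Prop := ∀ (distances : List Int), Dom_calc_validity distances → Spec_calc_validity distances (calc_validity distances)

-- ===== LEMMAS AND PROOFS =====

-- the threshold for index j, as A's branch structure computes it
def calcValidityThr (j : Nat) : Int := if j < 3 then 6 else if j < 8 then 3 else 2

theorem calcValidityLoopA_iff (distances : List Int) (a : Nat) :
    calcValidityLoopA distances (PySem.List.pyRange a distances.length 1) = true ↔
      ∀ j (h : j < distances.length), a ≤ j → calcValidityThr j ≤ distances[j] := by
  generalize hn : distances.length - a = n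
  induction n generalizing a with
  | zero =>
      rw [PySem.List.pyRange_one_eq_nil (by omega)]
      simp only [calcValidityLoopA, true_iff]
      intro j hj hij
      omega
  | succ n ih =>
      have ha : a < distances.length := by omega
      rw [PySem.List.pyRange_one_cons (by exact_mod_cast ha)]
      have hget : PySem.List.pyGetD distances (a : Int) 0 = distances[a] :=
        PySem.List.pyGetD_ofNat distances a 0 ha
      have hrec := ih (a + 1) (by omega)
      push_cast at hrec
      simp only [calcValidityLoopA, hget]
      have hsplit : ∀ t : Int,
          (calcValidityThr a = t) →
          ((if distances[a] < t then false
            else calcValidityLoopA distances (PySem.List.pyRange (↑a + 1) (↑distances.length) 1)) = true ↔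
            ∀ j (h : j < distances.length), a ≤ j → calcValidityThr j ≤ distances[j]) := by
        intro t ht
        by_cases hlt : distances[a] < t
        · rw [if_pos hlt]
          simp only [Bool.false_eq_true, false_iff]
          intro hall
          have := hall a ha le_rfl
          omega
        · rw [if_neg hlt, hrec]
          constructor
          · intro hall j hj hij
            rcases Nat.lt_or_ge a j with hlt' | hge
            · exact hall j hj (by omega)
            · have hji : j = a := le_antisymm (by omega) hij
              subst hji
              omega
          · intro hall j hj hij; exact hall j hj (by omega)
      by_cases h3 : a < 3
      · rw [if_pos (by exact_mod_cast h3)]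
        exact hsplit 6 (by simp [calcValidityThr, h3])
      · rw [if_neg (by exact_mod_cast h3)]
        by_cases h8 : a < 8
        · rw [if_pos (by exact_mod_cast h8)]
          exact hsplit 3 (by simp [calcValidityThr, h3, h8])
        · rw [if_neg (by exact_mod_cast h8)]
          exact hsplit 2 (by simp [calcValidityThr, h3, h8])

-- min(xs) >= t is exactly "xs nonempty and every element >= t"
theorem calcValidityMinGe_iff (xs : List Int) (t : Int) :
    calcValidityMinGe xs t = true ↔ xs ≠ [] ∧ ∀ y ∈ xs, t ≤ y := by
  unfold calcValidityMinGe
  cases hm : PySem.List.min? xs (fun x => x) with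
  | none =>
      have hnil := (PySem.List.min?_eq_none_iff (key := fun x => x) (xs := xs)).mp hm
      simp [hnil]
  | some m =>
      have hmem : m ∈ xs := PySem.List.min?_mem hm
      have hmin : ∀ y ∈ xs, m ≤ y := PySem.List.min?_isMin hm
      simp only [decide_eq_true_eq]
      constructor
      · intro htm
        exact ⟨by rintro rfl; simp at hmem, fun y hy => le_trans htm (hmin y hy)⟩
      · intro ⟨_, hall⟩
        exact hall m hmem

-- membership in (xs.drop a).take n, index form
theorem calcValidity_mem_seg (xs : List Int) (a n : Nat) (y : Int) :
    y ∈ (xs.drop a).take n ↔ ∃ j, ∃ h : j < xs.length, a ≤ j ∧ j < a + n ∧ xs[j] = y := by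
  rw [List.mem_iff_getElem]
  constructor
  · rintro ⟨k, hk, hget⟩
    have hk1 : k < n := lt_of_lt_of_le hk (List.length_take_le n (xs.drop a))
    have hk2 : a + k < xs.length := by
      have := hk
      simp [List.length_take, List.length_drop] at this
      omega
    refine ⟨a + k, hk2, by omega, by omega, ?_⟩
    rw [List.getElem_take, List.getElem_drop] at hget
    exact hget
  · rintro ⟨j, hj, haj, hjn, hget⟩
    refine ⟨j - a, by simp [List.length_take, List.length_drop]; omega, ?_⟩
    rw [List.getElem_take, List.getElem_drop]
    have hidx : a + (j - a) = j := by omega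
    simp only [hidx]
    exact hget

-- ===== VERDICT (by name: the statement is the Claim_ definition above) =====
theorem calc_validity_spec : Claim_equal_calc_validity := by
  intro distances _
  unfold Spec_calc_validity calc_validity calc_validity_alt
  by_cases hlen : distances.length = 20
  · rw [if_neg (by omega : ¬ distances.length ≠ 20), if_neg (by omega : ¬ distances.length ≠ 20)]
    have h03 : PySem.List.slice distances none (some 3) = distances.take 3 := by
      simpa using PySem.List.slice_to_natCast distances 3
    have h38 : PySem.List.slice distances (some 3) (some 8) = (distances.drop 3).take 5 := by
      simpa using PySem.List.slice_natCast distances 3 8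
    have h8e : PySem.List.slice distances (some 8) none = distances.drop 8 := by
      simpa using PySem.List.slice_from_natCast distances 8
    have hdropTake : distances.drop 8 = (distances.drop 8).take 12 := by
      rw [List.take_of_length_le]
      simp [hlen]
    have htake : distances.take 3 = (distances.drop 0).take 3 := by simp
    rw [h03, h38, h8e, hdropTake, htake]
    have hA := calcValidityLoopA_iff distances 0
    simp only [Nat.cast_zero] at hA
    rw [Bool.eq_iff_iff, hA]
    simp only [Bool.and_eq_true, calcValidityMinGe_iff, calcValidity_mem_seg]
    constructor
    · intro hall
      refine ⟨⟨⟨?_, ?_⟩, ⟨?_, ?_⟩⟩, ?_, ?_⟩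
      · intro hnil
        have : ((distances.drop 0).take 3).length = 3 := by simp [hlen]
        rw [hnil] at this; simp at this
      · rintro y ⟨j, hj, _, hjn, rfl⟩
        have := hall j hj (Nat.zero_le j)
        simp [calcValidityThr, show j < 3 by omega] at this
        exact this
      · intro hnil
        have : ((distances.drop 3).take 5).length = 5 := by simp [hlen]
        rw [hnil] at this; simp at this
      · rintro y ⟨j, hj, haj, hjn, rfl⟩
        have := hall j hj (Nat.zero_le j)
        simp [calcValidityThr, show ¬ j < 3 by omega, show j < 8 by omega] at this
        exact this
      · intro hnil
        have : ((distances.drop 8).take 12).length = 12 := by simp [hlen]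
        rw [hnil] at this; simp at this
      · rintro y ⟨j, hj, haj, hjn, rfl⟩
        have := hall j hj (Nat.zero_le j)
        simp [calcValidityThr, show ¬ j < 3 by omega, show ¬ j < 8 by omega] at this
        exact this
    · rintro ⟨⟨⟨_, h1⟩, ⟨_, h2⟩⟩, _, h3⟩ j hj _
      unfold calcValidityThr
      split_ifs with hj3 hj8
      · exact h1 distances[j] ⟨j, hj, by omega, by omega, rfl⟩
      · exact h2 distances[j] ⟨j, hj, by omega, by omega, rfl⟩
      · exact h3 distances[j] ⟨j, hj, by omega, by omega, rfl⟩
  · rw [if_pos (by omega), if_pos (by omega)]
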